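-- pv_equiv track=rewrite | github.com/cortega26/retardo_cne | build_irregularidades.py | split_by_labels
-- ===== SOURCE A (Python) =====
-- from typing import Dict, List, Optional, Tuple
--
-- LABELS = {
--     "afirmacion": ["afirmación", "afirmacion", "hecho", "hallazgo"],
--     "norma": ["norma", "marco legal", "base legal", "lopre", "reglamento", "constitución", "constitucion"],
--     "evidencia": ["evidencia", "fuente", "referencia", "cita", "enlace", "link"],
--     "impacto": ["impacto", "consecuencia", "implicación", "implicacion", "efecto"],
--     "replica": ["réplica", "replica", "contraargumento", "respuesta"],
-- }
--
-- def is_label_line(text: str, kind: str) -> bool: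
--     t = text.strip().lower()
--     for lbl in LABELS[kind]:
--         if t.startswith(lbl + ":") or t == lbl:
--             return True
--     return False
--
-- def detect_label(text: str) -> Tuple[Optional[str], str]:
--     for kind in LABELS:
--         if is_label_line(text, kind):
--             content = text.split(":", 1)[1].strip() if ":" in text else ""
--             return kind, content
--     return None, ""
--
-- def split_by_labels(paragraphs: List[str]) -> Dict[str, List[str]]:
--     """Divide por rótulos explícitos tipo 'Afirmación:' en el .docx.
--     Devuelve dict con listas de párrafos por clave (afirmacion, norma, evidencia, impacto, replica).
--     """
--     buckets = {k: [] for k in LABELS.keys()}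
--     current: Optional[str] = None
--     for para in paragraphs:
--         kind, content = detect_label(para)
--         if kind:
--             current = kind
--             if content:
--                 buckets[current].append(content)
--             continue
--         if current:
--             buckets[current].append(para)
--     return buckets
-- ===== SOURCE B (Python) =====
-- from typing import Dict, List, Optional, Tuple
--
-- LABELS = {
--     "afirmacion": ["afirmación", "afirmacion", "hecho", "hallazgo"],
--     "norma": ["norma", "marco legal", "base legal", "lopre", "reglamento", "constitución", "constitucion"],
--     "evidencia": ["evidencia", "fuente", "referencia", "cita", "enlace", "link"],
--     "impacto": ["impacto", "consecuencia", "implicación", "implicacion", "efecto"],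
--     "replica": ["réplica", "replica", "contraargumento", "respuesta"],
-- }
--
-- def is_label_line(text: str, kind: str) -> bool:
--     t = text.strip().lower()
--     for lbl in LABELS[kind]:
--         if t.startswith(lbl + ":") or t == lbl:
--             return True
--     return False
--
-- def detect_label(text: str) -> Tuple[Optional[str], str]:
--     for kind in LABELS:
--         if is_label_line(text, kind):
--             content = text.split(":", 1)[1].strip() if ":" in text else ""
--             return kind, content
--     return None, ""
--
-- def split_by_labels(paragraphs: List[str]) -> Dict[str, List[str]]:
--     """Segment-based variant: find each label heading, then bulk-copy the block
--     of paragraphs up to the next heading into that label's bucket."""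
--     buckets = {k: [] for k in LABELS}
--     i, n = 0, len(paragraphs)
--     while True:
--         # advance to the next label heading
--         while i < n and detect_label(paragraphs[i])[0] is None:
--             i += 1
--         if i == n:
--             break
--         kind, content = detect_label(paragraphs[i])
--         j = i + 1
--         while j < n and detect_label(paragraphs[j])[0] is None:
--             j += 1
--         buckets[kind].extend(([content] if content else []) + paragraphs[i + 1:j])
--         i = j
--     return buckets
-- ===== Notes on version B (the rewrite author's own statement) =====
-- stated objective: alternative
-- what changed: A's running-`current`-bucket state machine over every paragraph is replaced by a boundary-finding decomposition: scan to each label heading, take the whole block of paragraphs up to the next heading, and bulk-extend that label's bucket.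
import Mathlib
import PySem

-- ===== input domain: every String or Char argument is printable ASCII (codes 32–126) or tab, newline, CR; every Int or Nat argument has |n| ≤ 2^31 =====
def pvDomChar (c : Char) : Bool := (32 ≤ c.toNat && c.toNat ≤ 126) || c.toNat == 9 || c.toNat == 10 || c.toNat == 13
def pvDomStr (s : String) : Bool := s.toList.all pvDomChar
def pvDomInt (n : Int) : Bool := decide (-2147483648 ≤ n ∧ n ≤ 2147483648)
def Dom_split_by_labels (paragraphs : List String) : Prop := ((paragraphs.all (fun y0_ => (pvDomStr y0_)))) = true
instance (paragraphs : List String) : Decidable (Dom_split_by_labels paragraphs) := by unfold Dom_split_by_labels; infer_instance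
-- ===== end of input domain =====

-- B replaces A's per-paragraph state machine (a running `current` bucket) by a segment finder:
-- locate each label heading, then bulk-copy the block up to the next heading; same return value (alternative decomposition, not faster).

-- ===== PORT A =====
-- LABELS (module constant, shared verbatim by both Pythons)
def pyLABELS : PySem.Dict String (List String) := PySem.Dict.ofList
  [ ("afirmacion", ["afirmación", "afirmacion", "hecho", "hallazgo"]),
    ("norma", ["norma", "marco legal", "base legal", "lopre", "reglamento", "constitución", "constitucion"]),
    ("evidencia", ["evidencia", "fuente", "referencia", "cita", "enlace", "link"]),
    ("impacto", ["impacto", "consecuencia", "implicación", "implicacion", "efecto"]),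
    ("replica", ["réplica", "replica", "contraargumento", "respuesta"]) ]

-- is_label_line (shared helper): LABELS[kind] never misses at call sites (kind iterates LABELS' keys); getD [] is exact there
def is_label_line (text : String) (kind : String) : Bool :=
  let t := PySem.Str.lower (PySem.Str.strip text)
  (pyLABELS.getD kind []).any (fun lbl => PySem.Str.startswith t (lbl ++ ":") || t == lbl)

-- detect_label (shared helper); text.split(":", 1)[1] is guarded by ":" in text, so getD 1 "" is exact
def detect_label (text : String) : Option String × String :=
  match pyLABELS.keys.find? (fun kind => is_label_line text kind) with
  | some kind =>
      (some kind,
        if PySem.Str.isIn ":" text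
        then PySem.Str.strip (((PySem.Str.splitMax? text ":" 1).getD []).getD 1 "")
        else "")
  | none => (none, "")

-- buckets = {k: [] for k in LABELS.keys()} (the identical comprehension opens both Pythons)
def buckets0 : PySem.Dict String (List String) :=
  pyLABELS.keys.foldl (fun d k => d.insert k []) PySem.Dict.empty

-- the body of A's for-loop; buckets[current].append(x) is modify current [] (· ++ [x]) (current is always a key)
def stepA (st : PySem.Dict String (List String) × Option String) (para : String) :
    PySem.Dict String (List String) × Option String :=
  let kc := detect_label para      -- kind, content = detect_label(para)
  if h : kc.1.isSome then          -- if kind: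
      (if kc.2 ≠ "" then st.1.modify (kc.1.get h) [] (· ++ [kc.2]) else st.1, kc.1)
  else
      match st.2 with
      | some c => (st.1.modify c [] (· ++ [para]), st.2)
      | none => st

def split_by_labels (paragraphs : List String) : List (String × List String) :=
  (paragraphs.foldl stepA (buckets0, (none : Option String))).1.items

-- ===== PORT B =====
-- detect_label(q)[0] is None
def notLab (q : String) : Bool := ((detect_label q).1).isNone

-- B's outer loop: skip to the next heading (dropWhile = the scan `while … is None: i += 1`),
-- read its kind/content, take the block up to the next heading (takeWhile = the j-scan),
-- bulk-extend that bucket, continue after the block.  fuel only makes the recursion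
-- structural (it never runs out: each step consumes at least one list element).
def altLoop : Nat → PySem.Dict String (List String) → List String →
    PySem.Dict String (List String)
  | 0, b, _ => b
  | fuel + 1, b, rest =>
    match rest.dropWhile notLab with
    | [] => b
    | p :: ps =>
      let kc := detect_label p
      if h : kc.1.isSome then
        altLoop fuel (b.modify (kc.1.get h) []
          (· ++ ((if kc.2 ≠ "" then [kc.2] else []) ++ ps.takeWhile notLab))) ps
      else b   -- unreachable: the head surviving dropWhile is a label line

def split_by_labels_alt (paragraphs : List String) : List (String × List String) :=
  (altLoop (paragraphs.length + 1) buckets0 paragraphs).items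

-- ===== PRECONDITION & SPEC =====
def Spec_split_by_labels (paragraphs : List String) (out : List (String × List String)) : Prop := out = split_by_labels_alt paragraphs
instance (paragraphs : List String) (out : List (String × List String)) : Decidable (Spec_split_by_labels paragraphs out) := by unfold Spec_split_by_labels; infer_instance

-- ===== CLAIM (what is proved, stated in full; the proofs are below) =====
def Claim_equal_split_by_labels : Prop := ∀ (paragraphs : List String), Dom_split_by_labels paragraphs → Spec_split_by_labels paragraphs (split_by_labels paragraphs)

-- ===== LEMMAS AND PROOFS =====

-- a kind produced by detect_label is a key of LABELS
theorem detect_some_mem {q kind : String} {c : String}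
    (h : detect_label q = (some kind, c)) : kind ∈ pyLABELS.keys := by
  unfold detect_label at h
  rcases hf : pyLABELS.keys.find? (fun kind => is_label_line q kind) with _ | k <;> rw [hf] at h
  · simp at h
  · have hk : k = kind := by simpa using congrArg Prod.fst h
    exact hk ▸ List.mem_of_find?_eq_some hf

theorem nodup_pyLABELS_keys : pyLABELS.keys.Nodup :=
  PySem.Dict.nodup_keys_ofList _

theorem keys_buckets0 : buckets0.keys = pyLABELS.keys := by
  unfold buckets0
  rw [PySem.Dict.keys_foldl_insert (f := fun _ _ => ([] : List String))]
  rw [show PySem.Dict.keys (PySem.Dict.empty) = ([] : List String) from rfl]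
  rw [PySem.Set.update_nil_left]
  exact PySem.Set.ofList_eq_self_of_nodup _ nodup_pyLABELS_keys

-- modify of a present key keeps the key list
theorem keys_modify_of_contains {d : PySem.Dict String (List String)} {k : String}
    (h : d.contains k = true) (f : List String → List String) :
    (d.modify k [] f).keys = d.keys := by
  rw [PySem.Dict.keys_modify]
  exact PySem.Dict.keys_insert_of_contains _ _ h

-- two modifies of the same key fuse
theorem modify_modify (d : PySem.Dict String (List String)) (k : String)
    (f g : List String → List String) :
    (d.modify k [] f).modify k [] g = d.modify k [] (fun x => g (f x)) := by
  simp [PySem.Dict.modify, PySem.Dict.getD_insert_self, PySem.Dict.insert_insert_self]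

theorem insert_getD_self {d : PySem.Dict String (List String)} {k : String}
    (h : d.contains k = true) (hn : d.keys.Nodup) :
    d.insert k (d.getD k []) = d := by
  apply PySem.Dict.ext
  rw [PySem.Dict.items_insert_of_contains _ _ h]
  conv_rhs => rw [← List.map_id d.items]
  apply List.map_congr_left
  intro p hp
  by_cases hk : p.1 = k
  · have hm : (k, p.2) ∈ d.items := by rwa [← hk, Prod.mk.eta]
    have hv := PySem.Dict.getD_of_mem_items d hm hn []
    obtain ⟨p1, p2⟩ := p
    subst hk
    simp [hv]
  · simp [hk]

-- appending nothing to a present key's bucket is a no-op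
theorem modify_append_nil {d : PySem.Dict String (List String)} {k : String}
    (h : d.contains k = true) (hn : d.keys.Nodup) :
    d.modify k [] (· ++ []) = d := by
  simp only [PySem.Dict.modify, List.append_nil]
  exact insert_getD_self h hn

-- altLoop only looks at its list through dropWhile notLab
theorem altLoop_congr (fuel : Nat) (b : PySem.Dict String (List String)) {l₁ l₂ : List String}
    (h : l₁.dropWhile notLab = l₂.dropWhile notLab) :
    altLoop (fuel + 1) b l₁ = altLoop (fuel + 1) b l₂ := by
  simp only [altLoop, h]

theorem altLoop_nil {fuel : Nat} {b : PySem.Dict String (List String)} {l : List String}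
    (h : l.dropWhile notLab = []) : altLoop (fuel + 1) b l = b := by
  simp only [altLoop, h]

theorem altLoop_cons {fuel : Nat} {b : PySem.Dict String (List String)} {l ps : List String}
    {p kind content : String}
    (hd : l.dropWhile notLab = p :: ps) (hp : detect_label p = (some kind, content)) :
    altLoop (fuel + 1) b l = altLoop fuel (b.modify kind []
      (· ++ ((if content ≠ "" then [content] else []) ++ ps.takeWhile notLab))) ps := by
  simp only [altLoop, hd, hp]
  rfl

-- the prefix a current bucket would absorb
def applyCur (b : PySem.Dict String (List String)) (cur : Option String)
    (seg : List String) : PySem.Dict String (List String) :=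
  match cur with
  | none => b
  | some k => b.modify k [] (· ++ seg)

-- MAIN INVARIANT: A's fold from any reachable state (all LABELS keys present) equals
-- B's segment loop (with enough fuel) after the pending prefix is flushed into the current bucket.
theorem main_inv (ps : List String) : ∀ (b : PySem.Dict String (List String))
    (cur : Option String) (fuel : Nat), ps.length ≤ fuel → b.keys = pyLABELS.keys →
    (∀ k, cur = some k → k ∈ pyLABELS.keys) →
    (ps.foldl stepA (b, cur)).1
      = altLoop (fuel + 1) (applyCur b cur (ps.takeWhile notLab)) (ps.dropWhile notLab) := by
  induction ps with
  | nil =>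
    intro b cur fuel _ hb hcur
    simp only [List.foldl_nil, List.takeWhile_nil, List.dropWhile_nil]
    rw [altLoop_nil List.dropWhile_nil]
    cases cur with
    | none => rfl
    | some k =>
      have hk : b.contains k = true := by
        rw [PySem.Dict.contains_iff_mem_keys, hb]; exact hcur k rfl
      exact (modify_append_nil hk (hb ▸ nodup_pyLABELS_keys)).symm
  | cons q ps' ih =>
    intro b cur fuel hfuel hb hcur
    have hnodup : b.keys.Nodup := hb ▸ nodup_pyLABELS_keys
    rcases hq : detect_label q with ⟨k?, c⟩
    cases k? with
    | none =>
      have hnl : notLab q = true := by simp [notLab, hq]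
      rw [List.takeWhile_cons_of_pos hnl, List.dropWhile_cons_of_pos hnl]
      cases cur with
      | none =>
        have hs : stepA (b, none) q = (b, none) := by simp [stepA, hq]
        rw [List.foldl_cons, hs,
          ih b none fuel (by simp at hfuel; omega) hb hcur]
        rfl
      | some k =>
        have hkmem : k ∈ pyLABELS.keys := hcur k rfl
        have hk : b.contains k = true := by
          rw [PySem.Dict.contains_iff_mem_keys, hb]; exact hkmem
        have hs : stepA (b, some k) q = (b.modify k [] (· ++ [q]), some k) := by
          simp [stepA, hq]
        rw [List.foldl_cons, hs,
          ih _ (some k) fuel (by simp at hfuel; omega)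
            ((keys_modify_of_contains hk _).trans hb) hcur]
        show altLoop _ ((b.modify k [] (· ++ [q])).modify k [] (· ++ ps'.takeWhile notLab)) _
          = altLoop _ (b.modify k [] (· ++ (q :: ps'.takeWhile notLab))) _
        rw [modify_modify,
          show (fun x : List String => (x ++ [q]) ++ ps'.takeWhile notLab)
              = (fun x => x ++ (q :: ps'.takeWhile notLab)) from funext fun x => by simp]
    | some kind =>
      have hnl : notLab q = false := by simp [notLab, hq]
      have hkindmem : kind ∈ pyLABELS.keys := detect_some_mem hq
      obtain ⟨fuel', rfl⟩ : ∃ f, fuel = f + 1 := by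
        cases fuel
        · simp at hfuel
        · exact ⟨_, rfl⟩
      have hfuel' : ps'.length ≤ fuel' := by simp at hfuel; omega
      rw [List.takeWhile_cons_of_neg (by simp [hnl]),
        List.dropWhile_cons_of_neg (by simp [hnl])]
      have hcur0 : applyCur b cur [] = b := by
        cases cur with
        | none => rfl
        | some k =>
          have hk : b.contains k = true := by
            rw [PySem.Dict.contains_iff_mem_keys, hb]; exact hcur k rfl
          exact modify_append_nil hk hnodup
      rw [hcur0,
        altLoop_cons (List.dropWhile_cons_of_neg (by simp [hnl])) hq]
      by_cases hc : c ≠ ""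
      · have hs : stepA (b, cur) q = (b.modify kind [] (· ++ [c]), some kind) := by
          simp [stepA, hq, hc]
        rw [List.foldl_cons, hs,
          ih _ (some kind) fuel' hfuel'
            ((keys_modify_of_contains
              (by rw [PySem.Dict.contains_iff_mem_keys, hb]; exact hkindmem) _).trans hb)
            (by intro k hk; cases hk; exact hkindmem)]
        show altLoop _ ((b.modify kind [] (· ++ [c])).modify kind [] (· ++ ps'.takeWhile notLab)) _
          = altLoop _ _ ps'
        rw [modify_modify,
          show (fun x : List String => (x ++ [c]) ++ ps'.takeWhile notLab)
              = (fun x => x ++ ((if c ≠ "" then [c] else []) ++ ps'.takeWhile notLab)) from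
            funext fun x => by simp [hc]]
        exact altLoop_congr _ _ (List.dropWhile_idempotent ..)
      · have hs : stepA (b, cur) q = (b, some kind) := by
          simp [stepA, hq]
          intro h; exact absurd h hc
        rw [List.foldl_cons, hs,
          ih _ (some kind) fuel' hfuel' hb (by intro k hk; cases hk; exact hkindmem)]
        simp only [applyCur]
        rw [show (fun x : List String => x ++ ps'.takeWhile notLab)
              = (fun x => x ++ ((if c ≠ "" then [c] else []) ++ ps'.takeWhile notLab)) from
            funext fun x => by simp [hc]]
        exact altLoop_congr _ _ (List.dropWhile_idempotent ..)

-- ===== VERDICT (by name: the statement is the Claim_ definition above) =====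
theorem split_by_labels_spec : Claim_equal_split_by_labels := by
  intro paragraphs _
  unfold Spec_split_by_labels split_by_labels split_by_labels_alt
  rw [main_inv paragraphs buckets0 none paragraphs.length le_rfl keys_buckets0
    (by intro k h; cases h)]
  show (altLoop _ buckets0 (paragraphs.dropWhile notLab)).items = _
  rw [altLoop_congr _ buckets0 (List.dropWhile_idempotent ..)]
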